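-- pv_equiv track=rewrite | github.com/AlgoZenithNITC/GFG_POTD_Solutions_AlgoZenithNITC | 21-07-2024-maximum-product-subset-of-an-array.py | findMaxProduct
-- ===== SOURCE A (Python) =====
-- def findMaxProduct(nums):
--     size = len(nums)
--     if size == 1:
--         return nums[0]
--
--     result = 1
--     mod = 1000000007
--     min_neg_index = -1
--     min_neg_value = 0
--     zero_count = 0
--     neg_count = 0
--
--     for i in range(size):
--         if nums[i] == 0:
--             zero_count += 1
--         elif nums[i] < 0:
--             neg_count += 1
--             if min_neg_index == -1 or nums[i] > min_neg_value:
--                 min_neg_index = i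
--                 min_neg_value = nums[i]
--
--     if zero_count == size:
--         return 0
--
--     if neg_count == 1 and zero_count == size - 1:
--         return 0
--
--     for i in range(size):
--         if nums[i] == 0:
--             continue
--         if neg_count % 2 == 1 and i == min_neg_index:
--             continue
--         result = ((result * nums[i]) % mod + mod) % mod
--
--     return result
-- ===== SOURCE B (Python) =====
-- def findMaxProduct(nums):
--     if len(nums) == 1:
--         return nums[0]
--     s = sorted(nums)
--     size = len(s)
--     zero_count = s.count(0)
--     neg_count = sum(1 for x in s if x < 0)
--     if zero_count == size:
--         return 0
--     if neg_count == 1 and zero_count == size - 1: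
--         return 0
--     mod = 1000000007
--     result = 1
--     for i, x in enumerate(s):
--         if x == 0:
--             continue
--         if neg_count % 2 == 1 and i == neg_count - 1:
--             continue
--         result = result * x % mod
--     return result
-- ===== Notes on version B (the rewrite author's own statement) =====
-- stated objective: alternative
-- what changed: B sorts a copy of the input so the negative to drop is located by POSITION (after sorting the negatives occupy a prefix and the smallest-magnitude one sits at index neg_count-1), replacing A's single-pass running min-neg index/value tracking with sort-then-scan; counts come from s.count and a generator sum, and the modular step is a single p*x%mod instead of A's ((r*x)%mod+mod)%mod.
import Mathlib
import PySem

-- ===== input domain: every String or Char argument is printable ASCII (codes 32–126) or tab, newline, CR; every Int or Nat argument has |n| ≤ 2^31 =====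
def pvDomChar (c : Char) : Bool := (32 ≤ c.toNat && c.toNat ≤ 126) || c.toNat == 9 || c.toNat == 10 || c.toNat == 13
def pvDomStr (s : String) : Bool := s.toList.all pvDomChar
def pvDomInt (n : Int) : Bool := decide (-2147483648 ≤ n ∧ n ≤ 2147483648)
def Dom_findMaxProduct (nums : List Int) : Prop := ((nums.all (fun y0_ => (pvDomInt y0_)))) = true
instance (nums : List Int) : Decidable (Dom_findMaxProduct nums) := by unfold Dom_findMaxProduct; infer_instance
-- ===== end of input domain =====

-- B sorts a copy of the input and drops the smallest-magnitude negative BY POSITION (index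
-- neg_count-1 of the sorted list) instead of A's running min-neg index/value tracking
-- (objective: alternative, sort-then-scan; not claimed faster).

-- ===== PORT A =====
-- loop state = (min_neg_index, min_neg_value, zero_count, neg_count); the two 'for i in range(size)'
-- loops reading nums[i] are folds over the (index, value) pairs of PySem.List.enumerate nums 0
def pvStep1 (s : Int × Int × Int × Int) (p : Int × Int) : Int × Int × Int × Int :=
  if p.2 = 0 then (s.1, s.2.1, s.2.2.1 + 1, s.2.2.2)
  else if p.2 < 0 then
    if s.1 = -1 ∨ p.2 > s.2.1 then (p.1, p.2, s.2.2.1, s.2.2.2 + 1)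
    else (s.1, s.2.1, s.2.2.1, s.2.2.2 + 1)
  else s

def pvStep2 (nc : Int) (mni : Int) (r : Int) (p : Int × Int) : Int :=
  if p.2 = 0 then r
  else if PySem.Int.mod nc 2 = 1 ∧ p.1 = mni then r
  else PySem.Int.mod (PySem.Int.mod (r * p.2) 1000000007 + 1000000007) 1000000007

def findMaxProduct (nums : List Int) : Int :=
  let size : Int := nums.length
  if size = 1 then nums.headD 0  -- nums[0]; in range since len = 1
  else
    let s := (PySem.List.enumerate nums 0).foldl pvStep1 (-1, 0, 0, 0)
    if s.2.2.1 = size then 0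
    else if s.2.2.2 = 1 ∧ s.2.2.1 = size - 1 then 0
    else (PySem.List.enumerate nums 0).foldl (pvStep2 s.2.2.2 s.1) 1

-- ===== PORT B =====
-- B's loop: skip zeros and, when neg_count is odd, the element at index neg_count-1 of the sorted list
def pvStepB (nc : Int) (r : Int) (p : Int × Int) : Int :=
  if p.2 = 0 then r
  else if PySem.Int.mod nc 2 = 1 ∧ p.1 = nc - 1 then r
  else PySem.Int.mod (r * p.2) 1000000007

def findMaxProduct_alt (nums : List Int) : Int :=
  if nums.length = 1 then nums.headD 0  -- nums[0]; in range since len = 1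
  else
    let s := PySem.List.sorted nums (fun x => x) false
    let size : Int := s.length
    let zero_count : Int := PySem.List.count s 0
    -- sum(1 for x in s if x < 0)
    let neg_count : Int := ((s.filter (fun x => decide (x < 0))).map (fun _ => (1 : Int))).sum
    if zero_count = size then 0
    else if neg_count = 1 ∧ zero_count = size - 1 then 0
    else (PySem.List.enumerate s 0).foldl (pvStepB neg_count) 1

-- ===== PRECONDITION & SPEC =====
def Spec_findMaxProduct (nums : List Int) (out : Int) : Prop := out = findMaxProduct_alt nums
instance (nums : List Int) (out : Int) : Decidable (Spec_findMaxProduct nums out) := by unfold Spec_findMaxProduct; infer_instance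

-- ===== CLAIM (what is proved, stated in full; the proofs are below) =====
def Claim_equal_findMaxProduct : Prop := ∀ (nums : List Int), Dom_findMaxProduct nums → Spec_findMaxProduct nums (findMaxProduct nums)

-- ===== LEMMAS AND PROOFS =====

-- A's modular multiplication step ((r*x) % mod + mod) % mod is plain emod by 1000000007
def pvMul (r x : Int) : Int := PySem.Int.mod (PySem.Int.mod (r * x) 1000000007 + 1000000007) 1000000007

theorem pvMul_eq (r x : Int) : pvMul r x = (r * x) % 1000000007 := by
  unfold pvMul
  rw [PySem.Int.mod_eq_emod_of_pos (by norm_num), PySem.Int.mod_eq_emod_of_pos (by norm_num)]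
  omega

theorem foldl_pvMul (L : List Int) (r : Int) (h : L ≠ []) :
    L.foldl pvMul r = (r * L.prod) % 1000000007 := by
  induction L generalizing r with
  | nil => exact absurd rfl h
  | cons x t ih =>
    cases t with
    | nil => simp [pvMul_eq]
    | cons y u =>
      rw [List.foldl_cons, ih _ (by simp), pvMul_eq, List.prod_cons]
      rw [Int.mul_emod, Int.emod_emod_of_dvd _ dvd_rfl, ← Int.mul_emod]; simp [mul_assoc]

theorem foldl_pvMul_one (L : List Int) : L.foldl pvMul 1 = L.prod % 1000000007 := by
  cases L with
  | nil => simp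
  | cons x t => rw [foldl_pvMul _ _ (by simp), one_mul]

-- B's loop step p * x % mod is the same modular multiplication
theorem foldl_pvMulB_one (L : List Int) :
    L.foldl (fun p x => PySem.Int.mod (p * x) 1000000007) 1 = L.prod % 1000000007 := by
  have hf : (fun p x : Int => PySem.Int.mod (p * x) 1000000007) = pvMul := by
    funext p x
    rw [pvMul_eq, PySem.Int.mod_eq_emod_of_pos (by norm_num)]
  rw [hf, foldl_pvMul_one]

-- which pairs a skip-loop (skip zeros; if nc odd skip index mni) actually multiplies
def pvKeep (nc mni : Int) (p : Int × Int) : Bool :=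
  !(p.2 == 0) && !(PySem.Int.mod nc 2 == 1 && p.1 == mni)

theorem fold_skip (g : Int → Int → Int) (nc mni : Int) (e : List (Int × Int)) (r : Int) :
    e.foldl (fun r p => if p.2 = 0 then r
        else if PySem.Int.mod nc 2 = 1 ∧ p.1 = mni then r else g r p.2) r
      = ((e.filter (pvKeep nc mni)).map (·.2)).foldl g r := by
  have hm : PySem.Int.mod nc 2 = nc % 2 := PySem.Int.mod_eq_emod_of_pos (by norm_num)
  induction e generalizing r with
  | nil => rfl
  | cons p t ih =>
    by_cases h0 : p.2 = 0
    · rw [List.foldl_cons, if_pos h0, ih, List.filter_cons_of_neg (by simp [pvKeep, h0])]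
    · by_cases hpar : nc % 2 = 1
      · by_cases hi : p.1 = mni
        · rw [List.foldl_cons, if_neg h0, if_pos ⟨hm.trans hpar, hi⟩, ih,
              List.filter_cons_of_neg (by simp [pvKeep, hpar, hi])]
        · rw [List.foldl_cons, if_neg h0, if_neg (fun h => hi h.2), ih,
              List.filter_cons_of_pos (by simp [pvKeep, h0, hi]), List.map_cons, List.foldl_cons]
      · rw [List.foldl_cons, if_neg h0, if_neg (fun h => hpar (hm ▸ h.1)), ih,
            List.filter_cons_of_pos (by simp [pvKeep, h0, hpar]), List.map_cons, List.foldl_cons]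

theorem fold2A (nc mni : Int) (e : List (Int × Int)) (r : Int) :
    e.foldl (pvStep2 nc mni) r = ((e.filter (pvKeep nc mni)).map (·.2)).foldl pvMul r := by
  have h : pvStep2 nc mni = fun r p => if p.2 = 0 then r
      else if PySem.Int.mod nc 2 = 1 ∧ p.1 = mni then r else pvMul r p.2 := by
    funext r p; simp [pvStep2, pvMul]
  rw [h]; exact fold_skip pvMul nc mni e r

theorem fold2B (nc : Int) (e : List (Int × Int)) (r : Int) :
    e.foldl (pvStepB nc) r
      = ((e.filter (pvKeep nc (nc - 1))).map (·.2)).foldl (fun p x => PySem.Int.mod (p * x) 1000000007) r := by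
  have h : pvStepB nc = fun r p => if p.2 = 0 then r
      else if PySem.Int.mod nc 2 = 1 ∧ p.1 = nc - 1 then r
      else (fun p x => PySem.Int.mod (p * x) 1000000007) r p.2 := by
    funext r p; simp [pvStepB]
  rw [h]; exact fold_skip (fun p x => PySem.Int.mod (p * x) 1000000007) nc (nc - 1) e r

theorem enum_filter_snd (xs : List Int) : ∀ (k : Int),
    (((PySem.List.enumerate xs k).filter (fun p => !(p.2 == 0))).map (·.2))
      = xs.filter (fun x => !(x == 0)) := by
  induction xs with
  | nil => intro k; rfl
  | cons x t ih =>
    intro k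
    by_cases h : x = 0 <;> simp [PySem.List.enumerate_cons, h, ih]

-- even nc: nothing is skipped besides zeros
theorem kept_even (xs : List Int) (nc mni : Int) (hpar : ¬ PySem.Int.mod nc 2 = 1) :
    (((PySem.List.enumerate xs 0).filter (pvKeep nc mni)).map (·.2))
      = xs.filter (fun x => !(x == 0)) := by
  have hm : PySem.Int.mod nc 2 = nc % 2 := PySem.Int.mod_eq_emod_of_pos (by norm_num)
  have hpar' : ¬ nc % 2 = 1 := fun h => hpar (hm.trans h)
  have hkeep : (PySem.List.enumerate xs 0).filter (pvKeep nc mni)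
      = (PySem.List.enumerate xs 0).filter (fun p => !(p.2 == 0)) := by
    refine List.filter_congr (fun p _ => ?_)
    simp only [pvKeep]
    simp
    intro _
    exact Or.inl (by omega)
  rw [hkeep, enum_filter_snd]

-- odd nc: the kept values are the nonzero values with one copy of the value at index mni removed;
-- multiplied back by that value they recover the whole nonzero product
theorem kept_odd_prod (xs : List Int) (nc i' v' : Int)
    (hpar : PySem.Int.mod nc 2 = 1)
    (hmem : (i', v') ∈ PySem.List.enumerate xs 0) (hvne : v' ≠ 0) :
    v' * ((((PySem.List.enumerate xs 0).filter (pvKeep nc i')).map (·.2)).prod)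
      = (xs.filter (fun x => !(x == 0))).prod := by
  obtain ⟨e1, e2, hsplit⟩ := List.append_of_mem hmem
  have hpw := PySem.List.pairwise_lt_enumerate (xs := xs) (s := 0)
  rw [hsplit, List.pairwise_append, List.pairwise_cons] at hpw
  obtain ⟨hpw1, ⟨hpw2a, hpw2b⟩, hpw12⟩ := hpw
  have he1 : ∀ p ∈ e1, ¬(p.1 = i') := by
    intro p hp he
    have := hpw12 p hp (i', v') List.mem_cons_self
    rw [he] at this; exact lt_irrefl _ this
  have he2 : ∀ p ∈ e2, ¬(p.1 = i') := by
    intro p hp he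
    have := hpw2a p hp; rw [he] at this; exact lt_irrefl _ this
  have hpartrue : (PySem.Int.mod nc 2 == 1) = true := by
    rw [beq_iff_eq]; exact hpar
  have hkeepmid : pvKeep nc i' (i', v') = false := by
    simp only [pvKeep]; rw [hpartrue]; simp
  have hk1 : e1.filter (pvKeep nc i') = e1.filter (fun p => !(p.2 == 0)) := by
    refine List.filter_congr (fun p hp => ?_)
    simp only [pvKeep]; rw [hpartrue]; simp [he1 p hp]
  have hk2 : e2.filter (pvKeep nc i') = e2.filter (fun p => !(p.2 == 0)) := by
    refine List.filter_congr (fun p hp => ?_)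
    simp only [pvKeep]; rw [hpartrue]; simp [he2 p hp]
  have hkept : ((PySem.List.enumerate xs 0).filter (pvKeep nc i')).map (·.2)
      = (e1.filter (fun p => !(p.2 == 0))).map (·.2) ++ (e2.filter (fun p => !(p.2 == 0))).map (·.2) := by
    rw [hsplit, List.filter_append, List.filter_cons, hk1, hk2, hkeepmid]
    simp
  have hNZdecomp : xs.filter (fun x => !(x == 0))
      = (e1.filter (fun p => !(p.2 == 0))).map (·.2) ++ v' :: (e2.filter (fun p => !(p.2 == 0))).map (·.2) := by
    rw [← enum_filter_snd xs 0, hsplit, List.filter_append, List.filter_cons]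
    simp [hvne]
  rw [hkept, hNZdecomp]
  simp [List.prod_append, List.prod_cons]
  ring

-- A's first loop characterised: counts are filter lengths; on a nonempty negative set the
-- tracked value is its maximum and the tracked (index, value) pair occurs in the enumeration
theorem fold1_armed (xs : List Int) : ∀ (k i v zc nc : Int), 0 ≤ k → i ≠ -1 →
    ∃ i' v', (PySem.List.enumerate xs k).foldl pvStep1 (i, v, zc, nc) =
        (i', v', zc + ((xs.filter (fun x => x == 0)).length : Int),
          nc + ((xs.filter (fun x => decide (x < 0))).length : Int))
      ∧ v' = (xs.filter (fun x => decide (x < 0))).foldl max v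
      ∧ ((i' = i ∧ v' = v) ∨ ((i', v') ∈ PySem.List.enumerate xs k ∧ v' < 0)) := by
  induction xs with
  | nil => intro k i v zc nc _ _; exact ⟨i, v, by simp [PySem.List.enumerate_nil], rfl, Or.inl ⟨rfl, rfl⟩⟩
  | cons x t ih =>
    intro k i v zc nc hk hi
    rw [PySem.List.enumerate_cons, List.foldl_cons]
    by_cases h0 : x = 0
    · have hst : pvStep1 (i, v, zc, nc) (k, x) = (i, v, zc + 1, nc) := by simp [pvStep1, h0]
      rw [hst]
      obtain ⟨i', v', heq, hv, hd⟩ := ih (k+1) i v (zc+1) nc (by omega) hi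
      refine ⟨i', v', ?_, ?_, ?_⟩
      · rw [heq]; simp [h0]; ring_nf
      · simpa [h0] using hv
      · rcases hd with h | ⟨hm, hv0⟩
        · exact Or.inl h
        · exact Or.inr ⟨by simp [hm], hv0⟩
    · by_cases hneg : x < 0
      · by_cases hgt : x > v
        · have hst : pvStep1 (i, v, zc, nc) (k, x) = (k, x, zc, nc + 1) := by
            simp [pvStep1, h0, hneg, Or.inr hgt]
          rw [hst]
          obtain ⟨i', v', heq, hv, hd⟩ := ih (k+1) k x zc (nc+1) (by omega) (by omega)
          refine ⟨i', v', ?_, ?_, ?_⟩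
          · rw [heq]; simp [h0, hneg]; ring_nf
          · simp [hneg, hv, max_eq_right (le_of_lt hgt)]
          · rcases hd with ⟨hii, hvv⟩ | ⟨hm, hv0⟩
            · exact Or.inr ⟨by simp [hii, hvv], by omega⟩
            · exact Or.inr ⟨by simp [hm], hv0⟩
        · -- x < 0, x ≤ v: keep (i, v)
          have hst : pvStep1 (i, v, zc, nc) (k, x) = (i, v, zc, nc + 1) := by
            simp [pvStep1, h0, hneg, hi, hgt]
          rw [hst]
          obtain ⟨i', v', heq, hv, hd⟩ := ih (k+1) i v zc (nc+1) (by omega) hi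
          refine ⟨i', v', ?_, ?_, ?_⟩
          · rw [heq]; simp [h0, hneg]; ring_nf
          · simp [hneg, hv, max_eq_left (by omega : x ≤ v)]
          · rcases hd with h | ⟨hm, hv0⟩
            · exact Or.inl h
            · exact Or.inr ⟨by simp [hm], hv0⟩
      · -- x > 0: state unchanged
        have hst : pvStep1 (i, v, zc, nc) (k, x) = (i, v, zc, nc) := by
          simp [pvStep1, h0, hneg]
        rw [hst]
        obtain ⟨i', v', heq, hv, hd⟩ := ih (k+1) i v zc nc (by omega) hi
        refine ⟨i', v', ?_, ?_, ?_⟩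
        · rw [heq]; simp [h0, hneg]
        · simp [hneg, hv]
        · rcases hd with h | ⟨hm, hv0⟩
          · exact Or.inl h
          · exact Or.inr ⟨by simp [hm], hv0⟩

theorem fold1_start (xs : List Int) : ∀ (k zc nc : Int), 0 ≤ k →
    ∃ i' v', (PySem.List.enumerate xs k).foldl pvStep1 (-1, 0, zc, nc) =
        (i', v', zc + ((xs.filter (fun x => x == 0)).length : Int),
          nc + ((xs.filter (fun x => decide (x < 0))).length : Int))
      ∧ (xs.filter (fun x => decide (x < 0)) = [] → i' = -1 ∧ v' = 0)
      ∧ (xs.filter (fun x => decide (x < 0)) ≠ [] →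
          PySem.List.max? (xs.filter (fun x => decide (x < 0))) (fun y => y) = some v'
          ∧ (i', v') ∈ PySem.List.enumerate xs k ∧ v' < 0) := by
  induction xs with
  | nil =>
    intro k zc nc _
    exact ⟨-1, 0, by simp [PySem.List.enumerate_nil], fun _ => ⟨rfl, rfl⟩, fun h => absurd rfl h⟩
  | cons x t ih =>
    intro k zc nc hk
    rw [PySem.List.enumerate_cons, List.foldl_cons]
    by_cases h0 : x = 0
    · have hst : pvStep1 (-1, 0, zc, nc) (k, x) = (-1, 0, zc + 1, nc) := by simp [pvStep1, h0]
      rw [hst]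
      obtain ⟨i', v', heq, hnil, hneg⟩ := ih (k+1) (zc+1) nc (by omega)
      refine ⟨i', v', ?_, ?_, ?_⟩
      · rw [heq]; simp [h0]; ring_nf
      · intro h; exact hnil (by simpa [h0] using h)
      · intro h
        obtain ⟨hmax, hm, hv0⟩ := hneg (by simpa [h0] using h)
        exact ⟨by simpa [h0] using hmax, by simp [hm], hv0⟩
    · by_cases hneg : x < 0
      · have hst : pvStep1 (-1, 0, zc, nc) (k, x) = (k, x, zc, nc + 1) := by
          simp [pvStep1, h0, hneg]
        rw [hst]
        obtain ⟨i', v', heq, hv, hd⟩ := fold1_armed t (k+1) k x zc (nc+1) (by omega) (by omega)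
        refine ⟨i', v', ?_, ?_, ?_⟩
        · rw [heq]; simp [h0, hneg]; ring_nf
        · intro h; simp [hneg] at h
        · intro _
          refine ⟨?_, ?_, ?_⟩
          · rw [List.filter_cons_of_pos (by simpa using hneg), PySem.List.max?_id_cons, hv]
          · rcases hd with ⟨hii, hvv⟩ | ⟨hm, hv0⟩
            · simp [hii, hvv]
            · simp [hm]
          · rcases PySem.List.foldl_max_mem (t.filter (fun x => decide (x < 0))) x with hc | hc
            · rw [hv, hc]; exact hneg
            · rw [hv]; simpa using (List.mem_filter.mp hc).2
      · have hst : pvStep1 (-1, 0, zc, nc) (k, x) = (-1, 0, zc, nc) := by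
          simp [pvStep1, h0, hneg]
        rw [hst]
        obtain ⟨i', v', heq, hnil, hneg2⟩ := ih (k+1) zc nc (by omega)
        refine ⟨i', v', ?_, ?_, ?_⟩
        · rw [heq]; simp [h0, hneg]
        · intro h; exact hnil (by simpa [h0, hneg] using h)
        · intro h
          obtain ⟨hmax, hm, hv0⟩ := hneg2 (by simpa [h0, hneg] using h)
          exact ⟨by simpa [h0, hneg] using hmax, by simp [hm], hv0⟩

theorem pv_len_split (xs : List Int) : (xs.filter (fun x => x == 0)).length
    + (xs.filter (fun x => !(x == 0))).length = xs.length := by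
  induction xs with
  | nil => rfl
  | cons a t iht => by_cases ha : a = 0 <;> simp [ha] <;> omega

-- in a ≤-sorted list the negatives form the prefix of length (number of negatives)
theorem sorted_neg_take (l : List Int) (hpw : l.Pairwise (· ≤ ·)) :
    l.filter (fun x => decide (x < 0)) = l.take (l.filter (fun x => decide (x < 0))).length := by
  induction l with
  | nil => rfl
  | cons x t ih =>
    rw [List.pairwise_cons] at hpw
    by_cases hx : x < 0
    · rw [List.filter_cons_of_pos (by simpa using hx)]
      simp only [List.length_cons, List.take_succ_cons]
      rw [← ih hpw.2]
    · have hnil : t.filter (fun x => decide (x < 0)) = [] := by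
        rw [List.filter_eq_nil_iff]
        intro y hy
        have := hpw.1 y hy
        simp; omega
      rw [List.filter_cons_of_neg (by simpa using hx), hnil]
      simp

theorem pvMain (nums : List Int) : findMaxProduct nums = findMaxProduct_alt nums := by
  by_cases h1 : nums.length = 1
  · simp [findMaxProduct, findMaxProduct_alt, h1]
  · have h1' : ¬((nums.length : Int) = 1) := by intro h; exact h1 (by exact_mod_cast h)
    obtain ⟨i', v', heq, hnil, hnegs⟩ := fold1_start nums 0 0 0 le_rfl
    set s : List Int := PySem.List.sorted nums (fun x => x) false with hs
    have hperm : s.Perm nums := PySem.List.sorted_perm nums (fun x => x) false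
    have hpw : s.Pairwise (· ≤ ·) := by
      have := PySem.List.sorted_pairwise nums (fun x : Int => x)
      simpa using this
    -- the three quantities B computes, rewritten as A's filter lengths
    have hlen : s.length = nums.length := hperm.length_eq
    have hzerom : (s.filter (fun x => x == 0)).Perm (nums.filter (fun x => x == 0)) := hperm.filter _
    have hzero : (PySem.List.count s 0 : Int) = ((nums.filter (fun x => x == 0)).length : Int) := by
      rw [PySem.List.count_eq]
      have : List.count 0 s = (s.filter (fun x => x == 0)).length := by
        rw [List.count_eq_length_filter]
      rw [this, hzerom.length_eq]
    have hnegm : (s.filter (fun x => decide (x < 0))).Perm (nums.filter (fun x => decide (x < 0))) := hperm.filter _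
    have hnegc : ((s.filter (fun x => decide (x < 0))).map (fun _ => (1 : Int))).sum
        = ((nums.filter (fun x => decide (x < 0))).length : Int) := by
      rw [PySem.List.sum_map_const_int, hnegm.length_eq]; ring
    have hnzm : (s.filter (fun x => !(x == 0))).Perm (nums.filter (fun x => !(x == 0))) := hperm.filter _
    simp only [findMaxProduct, findMaxProduct_alt, heq, if_neg h1, if_neg h1', zero_add, ← hs,
      hzero, hnegc, hlen]
    have hlenZ := pv_len_split nums
    by_cases hz : ((nums.filter (fun x => x == 0)).length : Int) = (nums.length : Int)
    · rw [if_pos hz, if_pos hz]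
    · rw [if_neg hz, if_neg hz]
      by_cases hg2 : ((nums.filter (fun x => decide (x < 0))).length : Int) = 1
          ∧ ((nums.filter (fun x => x == 0)).length : Int) = (nums.length : Int) - 1
      · rw [if_pos hg2, if_pos hg2]
      · rw [if_neg hg2, if_neg hg2]
        rw [fold2A, foldl_pvMul_one, fold2B, foldl_pvMulB_one]
        congr 1
        set ncN : Nat := (nums.filter (fun x => decide (x < 0))).length with hncN
        by_cases hodd : PySem.Int.mod (ncN : Int) 2 = 1
        · -- odd number of negatives
          have hoddN : ncN % 2 = 1 := by
            rw [PySem.Int.mod_eq_emod_of_pos (by norm_num)] at hodd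
            omega
          have hNGne : nums.filter (fun x => decide (x < 0)) ≠ [] := by
            intro h
            have h0 : ncN = 0 := by rw [hncN, h]; rfl
            omega
          obtain ⟨hmax, hmemA, hv0⟩ := hnegs hNGne
          have hvne : v' ≠ 0 := by omega
          -- B's skipped element: the value of s at index ncN - 1
          have hncN1 : 1 ≤ ncN := by
            rcases Nat.eq_zero_or_pos ncN with h | h
            · rw [h] at hoddN; simp at hoddN
            · omega
          have hsneg : s.filter (fun x => decide (x < 0))
              = s.take (s.filter (fun x => decide (x < 0))).length := sorted_neg_take s hpw
          have hlenS : (s.filter (fun x => decide (x < 0))).length = ncN := hnegm.length_eq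
          have hltlen : ncN - 1 < s.length := by
            have : ncN ≤ s.length := by
              rw [← hlenS]; exact List.length_filter_le _ _
            omega
          set w : Int := s[ncN - 1]'hltlen with hw
          -- w is a member of the negatives of s, hence ≤ v' (the max)
          have hwmem : w ∈ s.filter (fun x => decide (x < 0)) := by
            rw [hsneg, hlenS]
            have : (s.take ncN)[ncN - 1]'(by rw [List.length_take]; omega) = w := by
              rw [List.getElem_take]
            rw [← this]
            exact List.getElem_mem _
          have hwle : w ≤ v' := by
            have := PySem.List.max?_isMax hmax w (hnegm.mem_iff.mp hwmem)
            simpa using this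
          -- v' is a member of the negatives of s, a prefix, so v' ≤ w by sortedness
          have hvmemS : v' ∈ s.filter (fun x => decide (x < 0)) := by
            apply hnegm.mem_iff.mpr
            apply List.mem_filter.mpr
            refine ⟨?_, by simpa using hv0⟩
            obtain ⟨j, hj, hp⟩ := (PySem.List.mem_enumerate_iff _ _ _).mp hmemA
            have hvv : v' = nums[j] := congrArg Prod.snd hp
            rw [hvv]; exact List.getElem_mem hj
          have hvlew : v' ≤ w := by
            rw [hsneg, hlenS] at hvmemS
            obtain ⟨j, hjlt, hjv⟩ := List.getElem_of_mem hvmemS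
            have hjlt' : j < ncN := by
              have := hjlt; rw [List.length_take] at this; omega
            have hj2 : s[j]'(by omega) = v' := by
              rw [← hjv, List.getElem_take]
            rcases Nat.lt_or_ge j (ncN - 1) with hlt | hge
            · have := (List.pairwise_iff_getElem.mp hpw) j (ncN - 1) (by omega) hltlen hlt
              rw [hj2] at this; exact this
            · have hjeq : j = ncN - 1 := by omega
              have heqi : s[j]'(by omega) = s[ncN - 1]'hltlen := by congr 1
              exact le_of_eq (hj2.symm.trans (heqi.trans hw.symm))
          have hwv : w = v' := le_antisymm hwle hvlew
          -- membership of (ncN-1, w) in the enumeration of s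
          have hmemB : ((ncN : Int) - 1, w) ∈ PySem.List.enumerate s 0 := by
            apply (PySem.List.mem_enumerate_iff _ _ _).mpr
            exact ⟨ncN - 1, hltlen, by rw [hw]; congr 1; omega⟩
          have hA := kept_odd_prod nums ((ncN : Int)) i' v' hodd hmemA hvne
          have hB := kept_odd_prod s ((ncN : Int)) ((ncN : Int) - 1) w hodd hmemB (by rw [hwv]; exact hvne)
          rw [hwv] at hB
          rw [hnzm.prod_eq] at hB
          exact mul_left_cancel₀ hvne (hA.trans hB.symm)
        · -- even number of negatives: only zeros are skipped on both sides
          rw [kept_even nums _ _ hodd, kept_even s _ _ hodd]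
          exact (hnzm.prod_eq).symm

-- ===== VERDICT (by name: the statement is the Claim_ definition above) =====
theorem findMaxProduct_spec : Claim_equal_findMaxProduct := by
  intro nums _
  unfold Spec_findMaxProduct
  exact pvMain nums
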